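-- pv_equiv track=rewrite | github.com/StyxKnight/momentum-mgm | mcp-server/server.py | _resolve_neighborhood
-- ===== SOURCE A (Python) =====
-- VALID_NEIGHBORHOODS = [
--     "Centennial Hill", "Downtown Montgomery", "West Side", "South Montgomery",
--     "South Montgomery / Eastchase", "Southeast Montgomery", "Midtown / Cloverdale",
--     "Cottage Hill", "North Montgomery / Chisholm", "East Montgomery / Eastdale",
--     "East Montgomery / Vaughn", "East Montgomery / Forest Park",
--     "Northwest Montgomery County", "Rural Montgomery County", "Pike Road",
--     "Garden District", "Cloverdale",
-- ]
--
-- def _resolve_neighborhood(neighborhood: str | None) -> str | None: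
--     """Fuzzy-match neighborhood name to closest valid name. Returns None if city-wide."""
--     if not neighborhood or neighborhood.lower() in ("montgomery", "all", "city-wide"):
--         return None
--     nb_lower = neighborhood.lower()
--     # Exact match
--     for valid in VALID_NEIGHBORHOODS:
--         if nb_lower == valid.lower():
--             return valid
--     # Partial match
--     for valid in VALID_NEIGHBORHOODS:
--         if nb_lower in valid.lower() or valid.lower() in nb_lower:
--             return valid
--     # Word overlap
--     words = set(nb_lower.split())
--     best, best_score = None, 0
--     for valid in VALID_NEIGHBORHOODS:
--         score = len(words & set(valid.lower().split()))
--         if score > best_score: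
--             best, best_score = valid, score
--     return best if best_score > 0 else neighborhood
-- ===== SOURCE B (Python) =====
-- VALID_NEIGHBORHOODS = [
--     "Centennial Hill", "Downtown Montgomery", "West Side", "South Montgomery",
--     "South Montgomery / Eastchase", "Southeast Montgomery", "Midtown / Cloverdale",
--     "Cottage Hill", "North Montgomery / Chisholm", "East Montgomery / Eastdale",
--     "East Montgomery / Vaughn", "East Montgomery / Forest Park",
--     "Northwest Montgomery County", "Rural Montgomery County", "Pike Road",
--     "Garden District", "Cloverdale",
-- ]
--
-- def _resolve_neighborhood(neighborhood):
--     """Single pass: rank each valid name by a (tier, score) priority key."""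
--     if not neighborhood or neighborhood.lower() in ("montgomery", "all", "city-wide"):
--         return None
--     nb_lower = neighborhood.lower()
--     words = set(nb_lower.split())
--     best, best_key = None, (0, 0)
--     for valid in VALID_NEIGHBORHOODS:
--         vl = valid.lower()
--         if nb_lower == vl:
--             key = (3, 0)
--         elif nb_lower in vl or vl in nb_lower:
--             key = (2, 0)
--         else:
--             score = len(words & set(vl.split()))
--             if score == 0:
--                 continue
--             key = (1, score)
--         if key > best_key:
--             best, best_key = valid, key
--     return best if best is not None else neighborhood
-- ===== Notes on version B (the rewrite author's own statement) =====
-- stated objective: alternative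
-- what changed: Replaces A's three sequential scans (exact, then substring, then word-overlap maximum) by a single loop that ranks each valid name with a lexicographic (tier, score) priority key and keeps the strictly best, earliest candidate.
import Mathlib
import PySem

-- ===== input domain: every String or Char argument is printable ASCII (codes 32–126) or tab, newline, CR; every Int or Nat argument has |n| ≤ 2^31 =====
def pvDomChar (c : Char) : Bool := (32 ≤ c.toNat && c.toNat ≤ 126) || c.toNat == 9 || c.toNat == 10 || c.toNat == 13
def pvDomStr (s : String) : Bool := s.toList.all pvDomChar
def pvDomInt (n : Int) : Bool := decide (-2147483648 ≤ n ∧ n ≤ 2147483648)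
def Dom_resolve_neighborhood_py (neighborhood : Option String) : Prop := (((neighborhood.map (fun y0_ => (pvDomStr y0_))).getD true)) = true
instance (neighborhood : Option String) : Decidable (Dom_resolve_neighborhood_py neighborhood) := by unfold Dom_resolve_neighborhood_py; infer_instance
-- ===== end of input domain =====

-- B replaces A's three sequential scans by one loop ranking candidates with a (tier, score) key; same results, one pass.

-- shared module constant VALID_NEIGHBORHOODS
def pvValid : List String :=
  ["Centennial Hill", "Downtown Montgomery", "West Side", "South Montgomery",
   "South Montgomery / Eastchase", "Southeast Montgomery", "Midtown / Cloverdale",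
   "Cottage Hill", "North Montgomery / Chisholm", "East Montgomery / Eastdale",
   "East Montgomery / Vaughn", "East Montgomery / Forest Park",
   "Northwest Montgomery County", "Rural Montgomery County", "Pike Road",
   "Garden District", "Cloverdale"]

-- len(words & set(vl.split())) — used verbatim by both Pythons
def pvScore (words : PySem.Set String) (vl : String) : Int :=
  PySem.Set.len (PySem.Set.inter words (PySem.Set.ofList (PySem.Str.split₀ vl)))

-- ===== PORT A =====
-- the body of A's word-overlap loop
def pvStepO (words : PySem.Set String) (st : Option String × Int) (v : String) : Option String × Int :=
  let score := pvScore words (PySem.Str.lower v)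
  if st.2 < score then (some v, score) else st

def resolve_neighborhood_py (neighborhood : Option String) : Option String :=
  match neighborhood with
  | none => none
  | some s =>
    if s == "" || PySem.Str.lower s == "montgomery" || PySem.Str.lower s == "all"
        || PySem.Str.lower s == "city-wide" then none
    else
      let nb := PySem.Str.lower s
      match pvValid.find? (fun v => nb == PySem.Str.lower v) with
      | some v => some v
      | none =>
        match pvValid.find? (fun v =>
            PySem.Str.isIn nb (PySem.Str.lower v) || PySem.Str.isIn (PySem.Str.lower v) nb) with
        | some v => some v
        | none =>
          let words := PySem.Set.ofList (PySem.Str.split₀ nb)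
          let r := pvValid.foldl (pvStepO words) (none, 0)
          if 0 < r.2 then r.1 else some s

-- ===== PORT B =====
-- Python tuple comparison (a, b) < (c, d)
def pvKeyLt (a b : Int × Int) : Bool := a.1 < b.1 || (a.1 == b.1 && a.2 < b.2)

-- the body of B's single ranking loop
def pvStepB (nb : String) (words : PySem.Set String) (st : Option String × (Int × Int)) (v : String) :
    Option String × (Int × Int) :=
  let vl := PySem.Str.lower v
  if nb == vl then
    (if pvKeyLt st.2 (3, 0) then (some v, (3, 0)) else st)
  else if PySem.Str.isIn nb vl || PySem.Str.isIn vl nb then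
    (if pvKeyLt st.2 (2, 0) then (some v, (2, 0)) else st)
  else
    let score := pvScore words vl
    if score = 0 then st
    else if pvKeyLt st.2 (1, score) then (some v, (1, score)) else st

def resolve_neighborhood_py_alt (neighborhood : Option String) : Option String :=
  match neighborhood with
  | none => none
  | some s =>
    if s == "" || PySem.Str.lower s == "montgomery" || PySem.Str.lower s == "all"
        || PySem.Str.lower s == "city-wide" then none
    else
      let nb := PySem.Str.lower s
      let words := PySem.Set.ofList (PySem.Str.split₀ nb)
      match (pvValid.foldl (pvStepB nb words) (none, (0, 0))).1 with
      | some v => some v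
      | none => some s

-- ===== PRECONDITION & SPEC =====
def Spec_resolve_neighborhood_py (neighborhood : Option String) (out : Option String) : Prop := out = resolve_neighborhood_py_alt neighborhood
instance (neighborhood : Option String) (out : Option String) : Decidable (Spec_resolve_neighborhood_py neighborhood out) := by unfold Spec_resolve_neighborhood_py; infer_instance

-- ===== CLAIM (what is proved, stated in full; the proofs are below) =====
def Claim_equal_resolve_neighborhood_py : Prop := ∀ (neighborhood : Option String), Dom_resolve_neighborhood_py neighborhood → Spec_resolve_neighborhood_py neighborhood (resolve_neighborhood_py neighborhood)

-- ===== LEMMAS AND PROOFS =====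

lemma pvScore_nonneg (words : PySem.Set String) (vl : String) : 0 ≤ pvScore words vl := by
  simp [pvScore, PySem.Set.len]

-- invariant of A's overlap loop: the candidate is set exactly when the best score is positive
lemma pvOverlap_inv (words : PySem.Set String) (L : List String) (st : Option String × Int)
    (h : st.1 = none ↔ st.2 = 0) (h0 : 0 ≤ st.2) :
    ((L.foldl (pvStepO words) st).1 = none ↔ (L.foldl (pvStepO words) st).2 = 0)
      ∧ 0 ≤ (L.foldl (pvStepO words) st).2 := by
  induction L generalizing st with
  | nil => exact ⟨h, h0⟩
  | cons x L ih =>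
    simp only [List.foldl_cons]
    apply ih
    · unfold pvStepO
      by_cases hlt : st.2 < pvScore words (PySem.Str.lower x)
      · simp only [hlt, if_pos]
        constructor
        · intro hc; simp at hc
        · intro hc; omega
      · simpa [hlt] using h
    · unfold pvStepO
      by_cases hlt : st.2 < pvScore words (PySem.Str.lower x)
      · simp only [hlt, if_pos]; omega
      · simpa [hlt] using h0

-- B's single loop equals the combination of A's three passes
lemma pvBest_char (nb : String) (words : PySem.Set String) (L : List String) :
    L.foldl (pvStepB nb words) (none, (0, 0)) =
      (match L.find? (fun v => nb == PySem.Str.lower v) with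
       | some v => (some v, (3, 0))
       | none =>
         match L.find? (fun v =>
             PySem.Str.isIn nb (PySem.Str.lower v) || PySem.Str.isIn (PySem.Str.lower v) nb) with
         | some v => (some v, (2, 0))
         | none =>
           match L.foldl (pvStepO words) (none, 0) with
           | (some v, sc) => (some v, (1, sc))
           | (none, _) => (none, (0, 0))) := by
  induction L using List.reverseRecOn with
  | nil => rfl
  | append_singleton L x ih =>
    rw [List.foldl_append, List.foldl_append, ih, List.find?_append, List.find?_append]
    simp only [List.foldl_cons, List.foldl_nil, List.find?_cons, List.find?_nil]
    obtain ⟨hiff, hpos⟩ := pvOverlap_inv words L (none, 0) (by simp) (le_refl 0)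
    rcases hO : L.foldl (pvStepO words) (none, 0) with ⟨ob, os⟩
    rw [hO] at hiff hpos
    by_cases hex : (nb == PySem.Str.lower x) = true
    · cases hE : L.find? (fun v => nb == PySem.Str.lower v) with
      | some v => simp [hE, hex, pvStepB, pvKeyLt]
      | none =>
        cases hP : L.find? (fun v => PySem.Str.isIn nb (PySem.Str.lower v) || PySem.Str.isIn (PySem.Str.lower v) nb) with
        | some v => simp [hE, hP, hex, hO, pvStepB, pvKeyLt]
        | none =>
          cases ob with
          | some w => simp_all [pvStepB, pvStepO, pvKeyLt, beq_iff_eq]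
          | none => simp_all [pvStepB, pvStepO, pvKeyLt, beq_iff_eq]
    · rw [Bool.not_eq_true] at hex
      by_cases hpx : (PySem.Str.isIn nb (PySem.Str.lower x) || PySem.Str.isIn (PySem.Str.lower x) nb) = true
      · simp only [hex, hpx]
        cases hE : L.find? (fun v => nb == PySem.Str.lower v) with
        | some v => simp [hE, hex, hpx, pvStepB, pvKeyLt]
        | none =>
          cases hP : L.find? (fun v => PySem.Str.isIn nb (PySem.Str.lower v) || PySem.Str.isIn (PySem.Str.lower v) nb) with
          | some v => simp [hE, hP, hex, hpx, hO, pvStepB, pvKeyLt]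
          | none =>
            cases ob with
            | some w => simp_all [pvStepB, pvStepO, pvKeyLt, beq_iff_eq]
            | none => simp_all [pvStepB, pvStepO, pvKeyLt, beq_iff_eq]
      · -- x is neither exact nor partial: both sides step through the overlap/score branch
        rw [Bool.not_eq_true] at hpx
        simp only [hex, hpx]
        cases hE : L.find? (fun v => nb == PySem.Str.lower v) with
        | some v => simp [hE, hex, hpx, pvStepB, pvStepO, pvKeyLt]
        | none =>
          cases hP : L.find? (fun v => PySem.Str.isIn nb (PySem.Str.lower v) || PySem.Str.isIn (PySem.Str.lower v) nb) with
          | some v => simp [hE, hP, hex, hpx, hO, pvStepB, pvStepO, pvKeyLt]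
          | none =>
            have hscn := pvScore_nonneg words (PySem.Str.lower x)
            by_cases hsc : pvScore words (PySem.Str.lower x) = 0
            · cases ob with
              | some w =>
                simp_all [pvStepB, pvStepO, pvKeyLt, beq_iff_eq]
                rw [if_neg (by omega)]
              | none => simp_all [pvStepB, pvStepO, pvKeyLt, beq_iff_eq]
            · cases ob with
              | some w =>
                by_cases hlt : os < pvScore words (PySem.Str.lower x)
                · simp_all [pvStepB, pvStepO, pvKeyLt, beq_iff_eq]
                · simp_all [pvStepB, pvStepO, pvKeyLt, beq_iff_eq]
                  rw [if_neg (by omega), if_neg (by omega)]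
              | none =>
                simp_all [pvStepB, pvStepO, pvKeyLt, beq_iff_eq]
                rw [if_pos (by omega)]

theorem resolve_neighborhood_py_spec : Claim_equal_resolve_neighborhood_py := by
  intro neighborhood _
  show resolve_neighborhood_py neighborhood = resolve_neighborhood_py_alt neighborhood
  cases neighborhood with
  | none => rfl
  | some s =>
    simp only [resolve_neighborhood_py, resolve_neighborhood_py_alt]
    by_cases hg : (s == "" || PySem.Str.lower s == "montgomery" || PySem.Str.lower s == "all"
        || PySem.Str.lower s == "city-wide") = true
    · simp [hg]
    · rw [Bool.not_eq_true] at hg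
      simp only [hg, Bool.false_eq_true, if_false]
      rw [pvBest_char]
      obtain ⟨hiff, hpos⟩ := pvOverlap_inv (PySem.Set.ofList (PySem.Str.split₀ (PySem.Str.lower s)))
        pvValid (none, 0) (by simp) (le_refl 0)
      cases hE : pvValid.find? (fun v => PySem.Str.lower s == PySem.Str.lower v) with
      | some v => simp [hE]
      | none =>
        cases hP : pvValid.find? (fun v =>
            PySem.Str.isIn (PySem.Str.lower s) (PySem.Str.lower v)
              || PySem.Str.isIn (PySem.Str.lower v) (PySem.Str.lower s)) with
        | some v => simp [hE, hP]
        | none =>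
          rcases hO : pvValid.foldl
              (pvStepO (PySem.Set.ofList (PySem.Str.split₀ (PySem.Str.lower s)))) (none, 0) with ⟨ob, os⟩
          rw [hO] at hiff hpos
          cases ob with
          | some w =>
            simp only [hE, hP, hO]
            rw [if_pos (by simp at hiff; omega)]
          | none =>
            simp only [hE, hP, hO]
            rw [if_neg (by simp at hiff; omega)]
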